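-- pv_equiv track=rewrite | github.com/AlbertNewton254/programming-challenges-solutions | pc02/pc02_04/python/pc02_04.py | solve
-- ===== SOURCE A (Python) =====
-- def can_map(cipher_word, plain_word, reverse_key, changed):
--     """Check if cipher_word can map to plain_word with current reverse_key."""
--     for i in range(len(cipher_word)):
--         c = ord(cipher_word[i]) - ord('a')
--         p = plain_word[i]
--
--         if reverse_key[c] != '*':
--             if reverse_key[c] != p:
--                 return False
--         else:
--             for j in range(26):
--                 if reverse_key[j] == p:
--                     return False
--
--             reverse_key[c] = p
--             changed[c] = True
--
--     return True
--
-- def solve(dictionary, word_index, words, reverse_key):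
--     """Recursively find a valid mapping."""
--     if word_index >= len(words):
--         return True
--
--     cipher_word = words[word_index]
--     word_len = len(cipher_word)
--
--     for dict_word in dictionary:
--         if len(dict_word) != word_len:
--             continue
--
--         changed = [False] * 26
--         reverse_key_copy = reverse_key[:]
--
--         if can_map(cipher_word, dict_word, reverse_key, changed):
--             if solve(dictionary, word_index + 1, words, reverse_key):
--                 return True
--
--         reverse_key[:] = reverse_key_copy
--
--     return False
-- ===== SOURCE B (Python) =====
-- def _extend(rk, cipher_word, plain_word):
--     """Return an extended key (tuple) mapping cipher_word to plain_word, or None."""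
--     new = list(rk)
--     for cc, p in zip(cipher_word, plain_word):
--         c = ord(cc) - ord('a')
--         cur = new[c]
--         if cur != '*':
--             if cur != p:
--                 return None
--         elif p in new:
--             return None
--         else:
--             new[c] = p
--     return tuple(new)
--
-- def solve(dictionary, word_index, words, reverse_key):
--     # Breadth-first frontier search: process the cipher words level by level,
--     # keeping the list of ALL distinct partial keys consistent so far.
--     n = len(words)
--     frontier = [tuple(reverse_key)]
--     i = word_index
--     while i < n and frontier:
--         w = words[i]
--         nxt = []
--         for rk in frontier:
--             for d in dictionary:
--                 if len(d) == len(w):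
--                     ext = _extend(rk, w, d)
--                     if ext is not None and ext not in nxt:
--                         nxt.append(ext)
--         frontier = nxt
--         i += 1
--     return bool(frontier)
-- ===== Notes on version B (the rewrite author's own statement) =====
-- stated objective: alternative
-- what changed: B replaces A's depth-first backtracking (recursion over word_index, mutating reverse_key in place and restoring a snapshot on failure) by a breadth-first level-by-level search: it keeps a frontier holding every distinct partial key consistent with the words processed so far, extends the whole frontier by each dictionary candidate at each level (deduplicating), and answers by whether the final frontier is nonempty; reverse_key is never mutated (A mutates it in place; the equivalence is about the return value only). …
import Mathlib
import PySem

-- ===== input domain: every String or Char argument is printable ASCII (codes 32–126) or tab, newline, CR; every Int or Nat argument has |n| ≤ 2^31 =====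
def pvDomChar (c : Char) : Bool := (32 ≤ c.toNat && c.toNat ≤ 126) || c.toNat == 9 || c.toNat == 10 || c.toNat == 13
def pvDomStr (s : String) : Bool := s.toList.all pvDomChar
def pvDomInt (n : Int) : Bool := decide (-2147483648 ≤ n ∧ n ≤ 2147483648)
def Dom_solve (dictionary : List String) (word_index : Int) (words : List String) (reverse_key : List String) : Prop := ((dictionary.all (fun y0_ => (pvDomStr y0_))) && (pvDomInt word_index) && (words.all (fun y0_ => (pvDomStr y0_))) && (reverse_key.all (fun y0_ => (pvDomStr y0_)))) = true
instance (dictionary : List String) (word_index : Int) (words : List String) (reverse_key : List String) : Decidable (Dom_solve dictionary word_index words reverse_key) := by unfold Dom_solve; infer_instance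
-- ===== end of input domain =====

-- B replaces A's depth-first mutate/restore backtracking by a breadth-first frontier search
-- (the list of all distinct partial keys consistent so far, extended level by level); same
-- return value; A mutates reverse_key in place, B does not — the equivalence proved is about
-- the RETURN value only.

-- ===== PORT A =====
-- can_map: iterates over the indices of cipher_word; ported as structural recursion over the
-- two character lists, threading the (reverse_key, changed) state that Python mutates in place.
-- Where Python raises (index out of range), the port returns (false, rk, changed) / default "";
-- those inputs are excluded by Pre_solve.
def canMap : List Char → List Char → List String → List Bool → (Bool × List String × List Bool)
  | [], _, rk, ch => (true, rk, ch)
  | _ :: _, [], rk, ch => (false, rk, ch)   -- Python would raise (plain shorter); unreachable: called with equal lengths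
  | cc :: cs, p :: ps, rk, ch =>
    let c : Int := (cc.toNat : Int) - 97
    let pS : String := String.singleton p
    match PySem.List.pyGet? rk c with
    | none => (false, rk, ch)               -- Python raises IndexError here; excluded by Pre_solve
    | some cur =>
      if cur ≠ "*" then
        if cur ≠ pS then (false, rk, ch) else canMap cs ps rk ch
      else
        if (List.range 26).any (fun j => PySem.List.pyGetD rk (j : Int) "" == pS) then
          (false, rk, ch)
        else
          canMap cs ps (PySem.List.pySetD rk c pS) (PySem.List.pySetD ch c true)

mutual
-- the `for dict_word in dictionary` loop with early return; `rk` is the value of reverse_key at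
-- loop entry — Python restores `reverse_key[:] = reverse_key_copy` after every iteration, so each
-- iteration starts from the same rk, and the recursive call receives can_map's mutated key.
-- (the proof argument hlt only justifies termination; it plays no computational role)
def tryA (dictionary rest : List String) (word_index : Int) (words : List String) (rk : List String) (cw : String) (hlt : word_index < (words.length : Int)) : Bool :=
  match rest with
  | [] => false
  | dw :: rest' =>
    if PySem.Str.len dw ≠ PySem.Str.len cw then
      tryA dictionary rest' word_index words rk cw hlt
    else
      let res := canMap cw.toList dw.toList rk (List.replicate 26 false)
      if res.1 then
        if solve dictionary (word_index + 1) words res.2.1 then true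
        else tryA dictionary rest' word_index words rk cw hlt    -- reverse_key[:] = reverse_key_copy
      else tryA dictionary rest' word_index words rk cw hlt      -- reverse_key[:] = reverse_key_copy
termination_by ((words.length - word_index).toNat, rest.length)
decreasing_by
  all_goals first
    | exact Prod.Lex.left _ _ (by omega)
    | exact Prod.Lex.right _ (by simp)

def solve (dictionary : List String) (word_index : Int) (words : List String) (reverse_key : List String) : Bool :=
  if h : word_index ≥ (words.length : Int) then true
  else
    match PySem.List.pyGet? words word_index with
    | none => false                         -- Python raises IndexError here; excluded by Pre_solve
    | some cipher_word => tryA dictionary dictionary word_index words reverse_key cipher_word (by omega)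
termination_by ((words.length - word_index).toNat, dictionary.length + 1)
decreasing_by
  all_goals first
    | exact Prod.Lex.left _ _ (by omega)
    | exact Prod.Lex.right _ (by simp)
end

-- ===== PORT B =====
-- _extend: pure — builds a new key from rk, never touching the argument; the zip drives the loop.
def extendGo : List String → List (Char × Char) → Option (List String)
  | nu, [] => some nu
  | nu, (cc, p) :: rest =>
    let c : Int := (cc.toNat : Int) - 97
    let pS : String := String.singleton p
    match PySem.List.pyGet? nu c with
    | none => none                          -- Python raises IndexError here; excluded by Pre_solve
    | some cur =>
      if cur ≠ "*" then
        if cur ≠ pS then none else extendGo nu rest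
      else if nu.contains pS then none
      else extendGo (PySem.List.pySetD nu c pS) rest

def extendKey (rk : List String) (cipher plain : List Char) : Option (List String) :=
  extendGo rk (cipher.zip plain)

-- one level of the breadth-first search: all distinct extensions of the frontier's keys by a
-- length-matching dictionary word (the two nested `for` loops building `nxt` with the
-- `ext not in nxt` dedup check)
def stepB (dictionary : List String) (w : String) (frontier : List (List String)) : List (List String) :=
  frontier.foldl (fun nxt rk =>
    dictionary.foldl (fun nxt d =>
      if PySem.Str.len d = PySem.Str.len w then
        match extendKey rk w.toList d.toList with
        | some ext => if nxt.contains ext then nxt else nxt ++ [ext]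
        | none => nxt
      else nxt) nxt) []

-- the `while i < n and frontier:` loop; returns bool(frontier) at the end
def bfsB (dictionary : List String) (n : Nat) (words : List String) (i : Int) (frontier : List (List String)) : Bool :=
  if h : i < (n : Int) ∧ frontier ≠ [] then
    match PySem.List.pyGet? words i with
    | none => false                         -- Python raises IndexError here; excluded by Pre_solve
    | some w => bfsB dictionary n words (i + 1) (stepB dictionary w frontier)
  else !frontier.isEmpty
termination_by ((n : Int) - i).toNat
decreasing_by omega

def solve_alt (dictionary : List String) (word_index : Int) (words : List String) (reverse_key : List String) : Bool :=
  bfsB dictionary words.length words word_index [reverse_key]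

-- ===== PRECONDITION & SPEC =====
-- Pre_solve admits three closed-form cases in which Python A provably returns without raising:
-- (1) word_index at/past the end of words; (2) word_index in range (Python's negative indexing
-- included) but no dictionary word has the length of words[word_index]; (3) a full 26-entry
-- reverse_key with every cipher letter's index ord(ch)-ord('a') inside [-26,25].  Outside these,
-- A's reverse_key[ord(ch)-97] / changed[c] indexing can raise IndexError, and on keys of length
-- ≠ 26 that the search does reach, A's duplicate scan of exactly reverse_key[0..25] is an
-- accident of the 26-letter task that B's whole-key membership test legitimately need not match.
def Pre_solve (dictionary : List String) (word_index : Int) (words : List String) (reverse_key : List String) : Prop :=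
  word_index ≥ (words.length : Int) ∨
  (-(words.length : Int) ≤ word_index ∧ word_index < (words.length : Int) ∧
    ∀ d ∈ dictionary, PySem.Str.len d ≠ PySem.Str.len (PySem.List.pyGetD words word_index "")) ∨
  (reverse_key.length = 26 ∧
    (words.all fun w => w.toList.all fun ch => 71 ≤ ch.toNat && ch.toNat ≤ 122) = true ∧
    -(words.length : Int) ≤ word_index)
instance (dictionary : List String) (word_index : Int) (words : List String) (reverse_key : List String) : Decidable (Pre_solve dictionary word_index words reverse_key) := by unfold Pre_solve; infer_instance

def pvWitness_solve : List String × Int × List String × List String :=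
  (["ab", "cd"], 0, ["ab"], List.replicate 26 "*")

def Spec_solve (dictionary : List String) (word_index : Int) (words : List String) (reverse_key : List String) (out : Bool) : Prop := out = solve_alt dictionary word_index words reverse_key
instance (dictionary : List String) (word_index : Int) (words : List String) (reverse_key : List String) (out : Bool) : Decidable (Spec_solve dictionary word_index words reverse_key out) := by unfold Spec_solve; infer_instance

-- ===== CLAIM (what is proved, stated in full; the proofs are below) =====
def Claim_equal_solve : Prop := ∀ (dictionary : List String) (word_index : Int) (words : List String) (reverse_key : List String), Dom_solve dictionary word_index words reverse_key → Pre_solve dictionary word_index words reverse_key → Spec_solve dictionary word_index words reverse_key (solve dictionary word_index words reverse_key)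

-- ===== LEMMAS AND PROOFS =====

-- the extensions of one key rk by the words of `rest`, in dictionary order, without dedup
def extsOf (rest : List String) (w : String) (rk : List String) : List (List String) :=
  match rest with
  | [] => []
  | d :: rest' =>
    if PySem.Str.len d = PySem.Str.len w then
      match extendKey rk w.toList d.toList with
      | some e => e :: extsOf rest' w rk
      | none => extsOf rest' w rk
    else extsOf rest' w rk

lemma dupscan (rk : List String) (hrk : rk.length = 26) (pS : String) :
    ((List.range 26).any fun j => PySem.List.pyGetD rk (j:Int) "" == pS) = rk.contains pS := by
  rw [Bool.eq_iff_iff]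
  simp only [List.any_eq_true, List.mem_range, PySem.List.pyGetD_natCast, beq_iff_eq,
    List.contains_iff_mem]
  constructor
  · rintro ⟨j, hj, hje⟩
    rw [← hje, List.getD_eq_getElem rk "" (by omega)]
    exact List.getElem_mem _
  · intro hm
    obtain ⟨j, hj, hje⟩ := List.mem_iff_getElem.mp hm
    exact ⟨j, by omega, by rw [List.getD_eq_getElem rk "" (by omega)]; exact hje⟩

theorem canMap_extendGo : ∀ (cipher plain : List Char) (rk : List String) (ch : List Bool),
    cipher.length = plain.length → rk.length = 26 →
    ((canMap cipher plain rk ch).1 = true ∧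
       extendGo rk (cipher.zip plain) = some (canMap cipher plain rk ch).2.1 ∧
       (canMap cipher plain rk ch).2.1.length = 26) ∨
    ((canMap cipher plain rk ch).1 = false ∧ extendGo rk (cipher.zip plain) = none) := by
  intro cipher
  induction cipher with
  | nil =>
    intro plain rk ch _ hrk
    left
    simp [canMap, extendGo, hrk]
  | cons cc cs ih =>
    intro plain rk ch hlen hrk
    cases plain with
    | nil => simp at hlen
    | cons p ps =>
      simp only [canMap, extendGo, List.zip_cons_cons]
      cases hg : PySem.List.pyGet? rk ((cc.toNat : Int) - 97) with
      | none => right; simp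
      | some cur =>
        by_cases h1 : cur = "*"
        · subst h1
          simp only [ne_eq, not_true_eq_false, if_false]
          rw [dupscan rk hrk (String.singleton p)]
          by_cases h2 : String.singleton p ∈ rk
          · right
            simp [h2]
          · simp only [List.contains_iff_mem, h2, if_false]
            exact ih ps (PySem.List.pySetD rk _ _) _ (by simpa using hlen)
              (by rw [PySem.List.length_pySetD]; exact hrk)
        · by_cases h2 : cur = String.singleton p
          · subst h2
            simp only [h1, ne_eq, not_false_eq_true, if_true, not_true_eq_false, if_false]
            exact ih ps rk ch (by simpa using hlen) hrk
          · right; simp [h1, h2]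

lemma extendGo_length : ∀ (l : List (Char × Char)) (nu e : List String),
    extendGo nu l = some e → e.length = nu.length := by
  intro l
  induction l with
  | nil => intro nu e h; simp only [extendGo, Option.some.injEq] at h; rw [h]
  | cons cp rest ih =>
    intro nu e h
    obtain ⟨cc, p⟩ := cp
    simp only [extendGo] at h
    cases hg : PySem.List.pyGet? nu ((cc.toNat : Int) - 97) with
    | none => rw [hg] at h; exact absurd h (by simp)
    | some cur =>
      rw [hg] at h
      dsimp only at h
      by_cases h1 : cur = "*"
      · subst h1
        simp only [ne_eq, not_true_eq_false, if_false] at h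
        by_cases h2 : nu.contains (String.singleton p)
        · rw [if_pos h2] at h; exact absurd h (by simp)
        · rw [if_neg h2] at h
          rw [ih _ _ h, PySem.List.length_pySetD]
      · by_cases h2 : cur = String.singleton p
        · rw [if_pos h1, if_neg (not_not_intro h2)] at h
          exact ih _ _ h
        · rw [if_pos h1, if_pos h2] at h
          exact absurd h (by simp)

lemma extsOf_length (w : String) (rk : List String) (hrk : rk.length = 26) :
    ∀ rest x, x ∈ extsOf rest w rk → x.length = 26 := by
  intro rest
  induction rest with
  | nil => intro x hx; simp [extsOf] at hx
  | cons d rest' ih =>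
    intro x hx
    simp only [extsOf] at hx
    by_cases hl : PySem.Str.len d = PySem.Str.len w
    · rw [if_pos hl] at hx
      cases he : extendKey rk w.toList d.toList with
      | none => rw [he] at hx; exact ih x hx
      | some e =>
        rw [he] at hx
        rcases List.mem_cons.mp hx with h | h
        · subst h; rw [extendGo_length _ _ _ he, hrk]
        · exact ih x h
    · rw [if_neg hl] at hx; exact ih x hx

-- membership in the inner foldl over the dictionary
lemma mem_inner (w : String) (rk : List String) :
    ∀ (rest : List String) (acc : List (List String)) (x : List String),
      x ∈ rest.foldl (fun nxt d =>
        if PySem.Str.len d = PySem.Str.len w then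
          match extendKey rk w.toList d.toList with
          | some ext => if nxt.contains ext then nxt else nxt ++ [ext]
          | none => nxt
        else nxt) acc ↔ x ∈ acc ∨ x ∈ extsOf rest w rk := by
  intro rest
  induction rest with
  | nil => intro acc x; simp [extsOf]
  | cons d rest' ih =>
    intro acc x
    simp only [List.foldl_cons, extsOf]
    by_cases hl : PySem.Str.len d = PySem.Str.len w
    · rw [if_pos hl, if_pos hl]
      cases he : extendKey rk w.toList d.toList with
      | none => exact ih acc x
      | some e =>
        dsimp only
        rw [ih]
        by_cases hc : acc.contains e
        · rw [if_pos hc]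
          have he' : e ∈ acc := List.contains_iff_mem.mp hc
          constructor
          · rintro (h | h); · exact Or.inl h
            · exact Or.inr (List.mem_cons_of_mem _ h)
          · rintro (h | h); · exact Or.inl h
            · rcases List.mem_cons.mp h with h | h
              · exact Or.inl (h ▸ he')
              · exact Or.inr h
        · rw [if_neg hc]
          simp only [List.mem_append, List.mem_cons]
          tauto
    · rw [if_neg hl, if_neg hl]
      exact ih acc x

lemma mem_stepB (dictionary : List String) (w : String) :
    ∀ (fr acc : List (List String)) (x : List String),
      x ∈ fr.foldl (fun nxt rk =>
        dictionary.foldl (fun nxt d =>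
          if PySem.Str.len d = PySem.Str.len w then
            match extendKey rk w.toList d.toList with
            | some ext => if nxt.contains ext then nxt else nxt ++ [ext]
            | none => nxt
          else nxt) nxt) acc
      ↔ x ∈ acc ∨ ∃ rk ∈ fr, x ∈ extsOf dictionary w rk := by
  intro fr
  induction fr with
  | nil => intro acc x; simp
  | cons rk fr' ih =>
    intro acc x
    simp only [List.foldl_cons]
    rw [ih, mem_inner]
    simp only [List.mem_cons]
    constructor
    · rintro ((h | h) | ⟨k, hk, hx⟩)
      · exact Or.inl h
      · exact Or.inr ⟨rk, Or.inl rfl, h⟩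
      · exact Or.inr ⟨k, Or.inr hk, hx⟩
    · rintro (h | ⟨k, hk | hk, hx⟩)
      · exact Or.inl (Or.inl h)
      · exact Or.inl (Or.inr (hk ▸ hx))
      · exact Or.inr ⟨k, hk, hx⟩

-- per level: A's candidate loop equals "some extension leads to success"
lemma tryA_exts (dictionary : List String) (wi : Int) (words : List String) (cw : String)
    (hlt : wi < (words.length : Int)) :
    ∀ (rest rk : List String), rk.length = 26 →
      tryA dictionary rest wi words rk cw hlt
        = (extsOf rest cw rk).any (fun e => solve dictionary (wi + 1) words e) := by
  intro rest
  induction rest with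
  | nil => intro rk _; rw [tryA]; simp [extsOf]
  | cons dw rest' ih =>
    intro rk hrk
    rw [tryA]
    simp only [extsOf]
    by_cases hl : PySem.Str.len dw = PySem.Str.len cw
    · rw [if_neg (not_not_intro hl), if_pos hl]
      have hlen : cw.toList.length = dw.toList.length := by
        rw [PySem.Str.len_eq, PySem.Str.len_eq] at hl
        omega
      rcases canMap_extendGo cw.toList dw.toList rk (List.replicate 26 false) hlen hrk
        with ⟨h1, h2, _⟩ | ⟨h1, h2⟩
      · unfold extendKey
        rw [h2]
        simp only [h1, if_true, List.any_cons]
        rw [ih rk hrk]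
        by_cases hs : solve dictionary (wi + 1) words
            (canMap cw.toList dw.toList rk (List.replicate 26 false)).2.1 = true
        · simp [hs]
        · simp only [Bool.not_eq_true] at hs
          simp [hs]
      · unfold extendKey
        rw [h2]
        simp only [h1, Bool.false_eq_true, if_false]
        exact ih rk hrk
    · rw [if_pos hl, if_neg hl]
      exact ih rk hrk

lemma bfs_done (fr : List (List String)) (p : List String → Bool)
    (hp : ∀ k ∈ fr, p k = true) : (!fr.isEmpty) = fr.any p := by
  cases fr with
  | nil => simp
  | cons a l => simp [hp a (by simp)]

-- main invariant: the breadth-first loop computes "some frontier key succeeds depth-first"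
lemma bfs_any (dictionary words : List String) :
    ∀ m : Nat, ∀ i : Int, (words.length - i).toNat ≤ m →
      ∀ fr : List (List String), (∀ k ∈ fr, k.length = 26) →
        bfsB dictionary words.length words i fr
          = fr.any (fun rk => solve dictionary i words rk) := by
  intro m
  induction m with
  | zero =>
    intro i hm fr _
    have h : i ≥ (words.length : Int) := by omega
    rw [bfsB]
    rw [dif_neg (by omega : ¬ (i < (words.length : Int) ∧ fr ≠ []))]
    exact bfs_done fr _ fun rk _ => by rw [solve]; simp [h]
  | succ m ih =>
    intro i hm fr hfr
    rw [bfsB]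
    by_cases hi : i < (words.length : Int)
    · by_cases hfe : fr = []
      · subst hfe
        rw [dif_neg (by simp)]
        simp
      · rw [dif_pos ⟨hi, hfe⟩]
        cases hg : PySem.List.pyGet? words i with
        | none =>
          dsimp only
          symm
          rw [List.any_eq_false]
          intro rk _
          rw [solve, dif_neg (by omega), hg]
          simp
        | some w =>
          dsimp only
          rw [ih (i + 1) (by omega) (stepB dictionary w fr)
              (fun k hk => by
                rcases (mem_stepB dictionary w fr [] k).mp hk with h | ⟨rk, hrk, hx⟩
                · simp at h
                · exact extsOf_length w rk (hfr rk hrk) dictionary k hx)]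
          rw [Bool.eq_iff_iff]
          simp only [List.any_eq_true]
          constructor
          · rintro ⟨e, he, hs⟩
            rcases (mem_stepB dictionary w fr [] e).mp he with h | ⟨rk, hrk, hx⟩
            · simp at h
            · refine ⟨rk, hrk, ?_⟩
              rw [solve, dif_neg (by omega), hg]
              show tryA dictionary dictionary i words rk w (by omega) = true
              rw [tryA_exts dictionary i words w (by omega) dictionary rk (hfr rk hrk)]
              simp only [List.any_eq_true]
              exact ⟨e, hx, hs⟩
          · rintro ⟨rk, hrk, hs⟩
            rw [solve, dif_neg (by omega), hg] at hs
            replace hs : tryA dictionary dictionary i words rk w (by omega) = true := hs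
            rw [tryA_exts dictionary i words w (by omega) dictionary rk (hfr rk hrk)] at hs
            simp only [List.any_eq_true] at hs
            obtain ⟨e, he, hse⟩ := hs
            exact ⟨e, (mem_stepB dictionary w fr [] e).mpr (Or.inr ⟨rk, hrk, he⟩), hse⟩
    · rw [dif_neg (by omega : ¬ (i < (words.length : Int) ∧ fr ≠ []))]
      exact bfs_done fr _ fun rk _ => by rw [solve]; simp; omega

lemma tryA_skip (dictionary : List String) (wi : Int) (words rk : List String) (cw : String)
    (hlt : wi < (words.length : Int)) :
    ∀ rest : List String, (∀ dw ∈ rest, PySem.Str.len dw ≠ PySem.Str.len cw) →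
      tryA dictionary rest wi words rk cw hlt = false := by
  intro rest
  induction rest with
  | nil => intro _; rw [tryA]
  | cons dw rest' ih =>
    intro h
    rw [tryA, if_pos (h dw (by simp))]
    exact ih fun d hd => h d (by simp [hd])

-- ===== VERDICT (by name: the statement is the Claim_ definition above) =====
theorem solve_spec : Claim_equal_solve := by
  intro dictionary word_index words reverse_key _ hpre
  unfold Spec_solve solve_alt
  rcases hpre with h1 | ⟨h2a, h2b, h2c⟩ | ⟨h3a, _, h3c⟩
  · rw [solve, bfsB]
    rw [dif_pos h1, dif_neg (by omega : ¬ (word_index < ((words.length : Nat) : Int) ∧ ([reverse_key] : List (List String)) ≠ []))]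
    simp
  · rw [solve, bfsB, dif_neg (by omega),
      dif_pos ⟨by omega, by simp⟩]
    cases hg : PySem.List.pyGet? words word_index with
    | none => rfl
    | some cw =>
      dsimp only
      have hcw : cw = PySem.List.pyGetD words word_index "" := by
        simp [PySem.List.pyGetD, hg]
      rw [tryA_skip dictionary word_index words reverse_key cw (by omega) dictionary
            (fun d hd => hcw ▸ h2c d hd)]
      have hstep : stepB dictionary cw [reverse_key] = [] := by
        rcases he : stepB dictionary cw [reverse_key] with _ | ⟨x, l⟩
        · rfl
        · exfalso
          have hx : x ∈ stepB dictionary cw [reverse_key] := by rw [he]; simp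
          rcases (mem_stepB dictionary cw [reverse_key] [] x).mp hx with h | ⟨rk, hrk, hex⟩
          · simp at h
          · have : ∀ rest, (∀ dw ∈ rest, PySem.Str.len dw ≠ PySem.Str.len cw) →
                extsOf rest cw rk = [] := by
              intro rest
              induction rest with
              | nil => intro _; rfl
              | cons d rest' ihr =>
                intro hh
                simp only [extsOf]
                rw [if_neg (hh d (by simp))]
                exact ihr fun d' hd' => hh d' (by simp [hd'])
            rw [this dictionary (fun d hd => hcw ▸ h2c d hd)] at hex
            simp at hex
      show false = bfsB dictionary words.length words (word_index + 1) (stepB dictionary cw [reverse_key])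
      rw [hstep, bfsB, dif_neg (by simp)]
      simp
  · rw [bfs_any dictionary words (words.length - word_index).toNat word_index le_rfl
        [reverse_key] (by intro k hk; simp at hk; rw [hk]; exact h3a)]
    simp
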